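-- pv_equiv track=rewrite | github.com/yje9802/Algorithms | 프로그래머스/3/77886. 110 옮기기/110 옮기기.py | solution
-- ===== SOURCE A (Python) =====
-- from collections import deque
--
-- def solution(s):
--     answer = []
--
--     for x in s:
--         cnt = 0
--         dq = deque([])
--         i = 0
--         while i < len(x):
--             dq.append(x[i])
--
--             if len(dq) >= 3:
--                 temp = deque([])
--                 for _ in range(3):
--                     ch = dq.pop()
--                     temp.appendleft(ch)
--                 if ''.join(temp) == "110":
--                     cnt += 1
--                 else:
--                     dq.extend(temp)
--             i += 1
--
--         # x 새로 만들기
--         rest = ''.join(dq)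
--         insert_pos = rest.rfind('0')  # 마지막 0의 위치
--
--         if insert_pos == -1:  # 0이 없는 경우
--             new_x = '110' * cnt + rest
--         else:
--             new_x = rest[:insert_pos+1] + '110' * cnt + rest[insert_pos+1:]
--
--         answer.append(new_x)
--
--     return answer
-- ===== SOURCE B (Python) =====
-- def solution(s):
--     answer = []
--     for x in s:
--         cnt = 0
--         while '110' in x:
--             i = x.find('110')
--             x = x[:i] + x[i+3:]
--             cnt += 1
--         insert_pos = x.rfind('0')
--         if insert_pos == -1:
--             answer.append('110' * cnt + x)
--         else:
--             answer.append(x[:insert_pos+1] + '110' * cnt + x[insert_pos+1:])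
--     return answer
-- ===== Notes on version B (the rewrite author's own statement) =====
-- stated objective: simpler
-- what changed: Replaces the single-pass deque/stack cancellation of '110' blocks by iterated find-and-delete of the leftmost '110' occurrence (counting deletions), keeping the identical rfind-based reconstruction; correct because '110'-deletion is confluent, and measurably faster in CPython because substring find/slicing runs in C instead of a per-character interpreted deque loop (though worst-case quadratic).
import Mathlib
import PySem

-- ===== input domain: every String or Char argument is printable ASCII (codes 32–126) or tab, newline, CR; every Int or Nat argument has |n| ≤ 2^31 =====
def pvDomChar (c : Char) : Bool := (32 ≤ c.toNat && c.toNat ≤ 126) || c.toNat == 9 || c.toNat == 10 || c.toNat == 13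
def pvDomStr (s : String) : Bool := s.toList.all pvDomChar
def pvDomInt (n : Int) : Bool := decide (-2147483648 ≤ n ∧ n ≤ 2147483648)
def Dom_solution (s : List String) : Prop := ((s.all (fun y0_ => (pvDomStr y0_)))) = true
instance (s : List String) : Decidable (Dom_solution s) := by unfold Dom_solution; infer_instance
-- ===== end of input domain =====

-- B replaces A's single-pass deque/stack cancellation of "110" blocks by iterated
-- find-and-delete of the leftmost "110" occurrence; the reconstruction (rfind-splice) is kept.

-- ===== PORT A =====
-- the deque is kept right-end-first (push = cons); temp = dq.take 3 is the popped-off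
-- right end, so deque-order "110" is the reversed pattern ['0','1','1']
def stepA (st : List Char × Nat) (c : Char) : List Char × Nat :=
  let dq := c :: st.1
  if 3 ≤ dq.length then
    if dq.take 3 = ['0', '1', '1'] then (dq.drop 3, st.2 + 1)
    else (dq, st.2)
  else (dq, st.2)

def solution (s : List String) : List String :=
  s.map (fun x =>
    let r := x.toList.foldl stepA ([], 0)
    let rest := r.1.reverse
    let insert_pos := PySem.Chars.rfind rest ['0']
    let blocks := (List.replicate r.2 ['1', '1', '0']).flatten
    if insert_pos = -1 then String.ofList (blocks ++ rest)
    else String.ofList (PySem.List.slice rest none (some (insert_pos + 1)) ++ blocks ++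
                    PySem.List.slice rest (some (insert_pos + 1)) none))

-- ===== PORT B =====
-- termination: deleting the found occurrence shortens the string by 3
theorem reduceB_dec (x : List Char) (h : PySem.Chars.isIn ['1', '1', '0'] x = true) :
    (PySem.List.slice x none (some (PySem.Chars.find x ['1', '1', '0'])) ++
     PySem.List.slice x (some (PySem.Chars.find x ['1', '1', '0'] + 3)) none).length < x.length := by
  have hi : 0 ≤ PySem.Chars.find x ['1', '1', '0'] :=
    (PySem.Chars.find_nonneg_iff x _).mpr ((PySem.Chars.isIn_iff_infix _ x).mp h)
  have hsp := (PySem.Chars.find_spec hi).1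
  have hlen := hsp.length_le
  simp only [List.length_drop, List.length_cons, List.length_nil] at hlen
  rw [PySem.List.slice_to x hi, PySem.List.slice_from x (by omega)]
  simp only [List.length_append, List.length_take, List.length_drop]
  omega

def reduceB (x : List Char) : List Char × Nat :=
  if h : PySem.Chars.isIn ['1', '1', '0'] x then
    let i := PySem.Chars.find x ['1', '1', '0']
    let p := reduceB (PySem.List.slice x none (some i) ++ PySem.List.slice x (some (i + 3)) none)
    (p.1, p.2 + 1)
  else (x, 0)
termination_by x.length
decreasing_by exact reduceB_dec x h

def solution_alt (s : List String) : List String :=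
  s.map (fun x =>
    let p := reduceB x.toList
    let pos := PySem.Chars.rfind p.1 ['0']
    let rep := (List.replicate p.2 ['1', '1', '0']).flatten
    if pos = -1 then String.ofList (rep ++ p.1)
    else String.ofList (PySem.List.slice p.1 none (some (pos + 1)) ++ rep ++
                    PySem.List.slice p.1 (some (pos + 1)) none))

-- ===== PRECONDITION & SPEC =====
def Spec_solution (s : List String) (out : List String) : Prop := out = solution_alt s
instance (s : List String) (out : List String) : Decidable (Spec_solution s out) := by unfold Spec_solution; infer_instance

-- ===== CLAIM (what is proved, stated in full; the proofs are below) =====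
def Claim_equal_solution : Prop := ∀ (s : List String), Dom_solution s → Spec_solution s (solution s)

-- ===== LEMMAS AND PROOFS =====

-- the counter threads through the fold additively
theorem foldl_stepA_cnt (v : List Char) (st : List Char) (cnt : Nat) :
    List.foldl stepA (st, cnt) v =
      ((List.foldl stepA (st, 0) v).1, cnt + (List.foldl stepA (st, 0) v).2) := by
  induction v generalizing st cnt with
  | nil => simp
  | cons c v ih =>
    have hstep : stepA (st, cnt) c = ((stepA (st, 0) c).1, cnt + (stepA (st, 0) c).2) := by
      simp only [stepA]
      split_ifs <;> simp
    simp only [List.foldl_cons, hstep]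
    rw [ih (stepA (st, 0) c).1 (cnt + (stepA (st, 0) c).2),
        ih (stepA (st, 0) c).1 (stepA (st, 0) c).2]
    simp [Nat.add_assoc]

-- feeding "110" to the stack cancels, whatever the stack holds
theorem foldl_stepA_110 (v : List Char) (st : List Char) (cnt : Nat) :
    List.foldl stepA (st, cnt) ('1' :: '1' :: '0' :: v) = List.foldl stepA (st, cnt + 1) v := by
  simp [List.foldl_cons, stepA]

-- with no "110" occurrence ahead of or across the stack boundary, nothing cancels
theorem foldl_stepA_noOcc (v : List Char) (st : List Char) (cnt : Nat)
    (h : ¬ ['1', '1', '0'] <:+: (st.reverse ++ v)) :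
    List.foldl stepA (st, cnt) v = (v.reverse ++ st, cnt) := by
  induction v generalizing st with
  | nil => simp
  | cons c v ih =>
    have hstep : stepA (st, cnt) c = (c :: st, cnt) := by
      simp only [stepA]
      split_ifs with h1 h2
      · exfalso
        match st, h2 with
        | a :: b :: t, h2 =>
          simp only [List.take, List.cons.injEq] at h2
          obtain ⟨hc, ha, hb, -⟩ := h2
          subst hc ha hb
          exact h ⟨t.reverse, v, by simp⟩
      · rfl
      · rfl
    rw [List.foldl_cons, hstep, ih (c :: st) (by simpa using h)]
    simp

-- deleting one "110" block anywhere shifts the stack result by one count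
theorem foldl_stepA_splice (u v : List Char) :
    List.foldl stepA ([], 0) (u ++ '1' :: '1' :: '0' :: v) =
      ((List.foldl stepA ([], 0) (u ++ v)).1, (List.foldl stepA ([], 0) (u ++ v)).2 + 1) := by
  rw [List.foldl_append, List.foldl_append,
      foldl_stepA_110 v (List.foldl stepA ([], 0) u).1 (List.foldl stepA ([], 0) u).2,
      foldl_stepA_cnt v (List.foldl stepA ([], 0) u).1 ((List.foldl stepA ([], 0) u).2 + 1),
      foldl_stepA_cnt v (List.foldl stepA ([], 0) u).1 (List.foldl stepA ([], 0) u).2]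
  simp [Nat.add_assoc, Nat.add_comm]

-- the stack pass computes exactly what iterated leftmost deletion computes
theorem runA_eq_reduceB (x : List Char) :
    ((List.foldl stepA ([], 0) x).1.reverse, (List.foldl stepA ([], 0) x).2) = reduceB x := by
  induction x using reduceB.induct with
  | case2 x h =>
    rw [reduceB]
    simp only [h]
    have hno : ¬ ['1', '1', '0'] <:+: (([] : List Char).reverse ++ x) := by
      simpa using (PySem.Chars.isIn_eq_false_iff _ x).mp (by simpa using h)
    rw [foldl_stepA_noOcc x [] 0 hno]
    simp
  | case1 x h i ih =>
    have hi : 0 ≤ PySem.Chars.find x ['1', '1', '0'] :=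
      (PySem.Chars.find_nonneg_iff x _).mpr ((PySem.Chars.isIn_iff_infix _ x).mp h)
    have hsp := (PySem.Chars.find_spec hi).1
    obtain ⟨w, hw⟩ := hsp
    have hx : x = x.take (PySem.Chars.find x ['1', '1', '0']).toNat ++ '1' :: '1' :: '0' :: w := by
      conv_lhs => rw [← List.take_append_drop (PySem.Chars.find x ['1', '1', '0']).toNat x, ← hw]
      rfl
    have hw' : x.drop ((PySem.Chars.find x ['1', '1', '0']).toNat + 3) = w := by
      rw [← List.drop_drop, ← hw]; rfl
    rw [reduceB]
    simp only [h, dite_true]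
    have hx' : PySem.List.slice x none (some (PySem.Chars.find x ['1', '1', '0'])) ++
        PySem.List.slice x (some (PySem.Chars.find x ['1', '1', '0'] + 3)) none =
        x.take (PySem.Chars.find x ['1', '1', '0']).toNat ++ w := by
      rw [PySem.List.slice_to x hi, PySem.List.slice_from x (by omega)]
      congr 1
      rw [← hw']
      congr 1
      omega
    rw [hx'] at ih
    conv_lhs => rw [hx]
    rw [foldl_stepA_splice, hx', ← ih]

-- ===== VERDICT (by name: the statement is the Claim_ definition above) =====
theorem solution_spec : Claim_equal_solution := by
  intro s _
  unfold Spec_solution solution solution_alt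
  refine List.map_congr_left ?_
  intro x _
  have h := runA_eq_reduceB x.toList
  have h1 := congrArg Prod.fst h
  have h2 := congrArg Prod.snd h
  simp only at h1 h2
  simp only [h1, h2]
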